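-- pv_equiv track=rewrite | github.com/idan10000/University | Intro. comp/hw1/hw1_322522111.py | max_div_seq
-- ===== SOURCE A (Python) =====
-- def max_div_seq(n, k):
--     curSeq = ""
--     maxLen = 0
--     for dig in str(n):
--         if int(dig) % k == 0:
--             curSeq += dig
--             if len(curSeq) > maxLen:
--                 maxLen = len(curSeq)
--         else:
--             curSeq = ""
--     return maxLen
-- ===== SOURCE B (Python) =====
-- def max_div_seq(n, k):
--     # Recursive decomposition: take the maximal divisible prefix run,
--     # then recurse past the first non-divisible digit.
--     def longest(s):
--         if not s:
--             return 0
--         run = 0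
--         while run < len(s) and int(s[run]) % k == 0:
--             run += 1
--         return max(run, longest(s[run + 1:]))
--     return longest(str(n))
-- ===== Notes on version B (the rewrite author's own statement) =====
-- stated objective: alternative
-- what changed: Replaces the single-pass running-counter/maximum fold with a recursive decomposition: take the maximal divisible prefix run, then recurse on the suffix after the first blocking digit, taking max of run lengths.
import Mathlib
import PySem

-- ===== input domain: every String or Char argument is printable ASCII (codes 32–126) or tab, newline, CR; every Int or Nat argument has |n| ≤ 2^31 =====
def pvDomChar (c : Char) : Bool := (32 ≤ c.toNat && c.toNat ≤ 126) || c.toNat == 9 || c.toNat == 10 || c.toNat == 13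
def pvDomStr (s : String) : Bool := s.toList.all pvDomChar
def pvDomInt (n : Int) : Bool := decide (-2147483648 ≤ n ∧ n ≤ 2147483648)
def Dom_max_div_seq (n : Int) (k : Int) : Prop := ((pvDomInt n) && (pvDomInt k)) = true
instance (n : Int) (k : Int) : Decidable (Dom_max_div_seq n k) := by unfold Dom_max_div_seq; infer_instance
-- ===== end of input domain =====

-- B replaces A's running-counter fold by a recursive "take divisible prefix run, recurse past the blocker" decomposition (alternative, same cost).
-- Pre_ excludes k = 0 (ZeroDivisionError) and n < 0 (ValueError on the '-' sign), where Python A (and B) raise.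


-- int(dig) for a one-character string (exact where Python returns; Python raises on non-digits, excluded by Pre_)
def pvDigitInt (c : Char) : Int := (PySem.Int.ofStr? (String.ofList [c])).getD 0

-- ===== PORT A =====
def max_div_seq (n : Int) (k : Int) : Int :=
  (((PySem.Int.toStr n).toList).foldl
    (fun (st : String × Int) dig =>
      if PySem.Int.mod (pvDigitInt dig) k = 0 then
        let cur := st.1.push dig
        (cur, if (cur.length : Int) > st.2 then (cur.length : Int) else st.2)
      else ("", st.2)) ("", 0)).2

-- ===== PORT B =====
-- the 'while run < len(s) and int(s[run]) % k == 0: run += 1' loop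
def pvSpanDiv (k : Int) : List Char → Nat
  | [] => 0
  | c :: t => if PySem.Int.mod (pvDigitInt c) k = 0 then pvSpanDiv k t + 1 else 0

def pvLongest (k : Int) (s : List Char) : Int :=
  if s = [] then 0
  else
    let run := pvSpanDiv k s
    max (run : Int) (pvLongest k (s.drop (run + 1)))
termination_by s.length
decreasing_by
  rename_i h
  have : 0 < s.length := List.length_pos_iff.mpr h
  simp [List.length_drop]; omega

def max_div_seq_alt (n : Int) (k : Int) : Int :=
  pvLongest k (PySem.Int.toStr n).toList

-- ===== PRECONDITION & SPEC =====
-- Pre_ excludes exactly the inputs where Python A raises: k = 0 (ZeroDivisionError on the first digit)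
-- and n < 0 (ValueError: int('-')).
def Pre_max_div_seq (n : Int) (k : Int) : Prop := 0 ≤ n ∧ k ≠ 0
instance (n : Int) (k : Int) : Decidable (Pre_max_div_seq n k) := by unfold Pre_max_div_seq; infer_instance
def pvWitness_max_div_seq : Int × Int := (36936, 3)

def Spec_max_div_seq (n : Int) (k : Int) (out : Int) : Prop := out = max_div_seq_alt n k
instance (n : Int) (k : Int) (out : Int) : Decidable (Spec_max_div_seq n k out) := by unfold Spec_max_div_seq; infer_instance

-- ===== CLAIM (what is proved, stated in full; the proofs are below) =====
def Claim_equal_max_div_seq : Prop := ∀ (n : Int) (k : Int), Dom_max_div_seq n k → Pre_max_div_seq n k → Spec_max_div_seq n k (max_div_seq n k)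

-- ===== LEMMAS AND PROOFS =====

-- proof-only helper: best run length with a current run of length cur already open
def pvH (k : Int) : Nat → List Char → Nat
  | _, [] => 0
  | cur, c :: t => if PySem.Int.mod (pvDigitInt c) k = 0 then max (cur + 1) (pvH k (cur + 1) t) else pvH k 0 t

theorem foldA_eq_pvH (k : Int) (l : List Char) : ∀ (s : String) (m : Int), 0 ≤ m →
    (l.foldl (fun (st : String × Int) dig =>
      if PySem.Int.mod (pvDigitInt dig) k = 0 then
        let cur := st.1.push dig
        (cur, if (cur.length : Int) > st.2 then (cur.length : Int) else st.2)
      else ("", st.2)) (s, m)).2 = max m ((pvH k s.length l : Nat) : Int) := by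
  induction l with
  | nil => intro s m hm; simp [pvH]; omega
  | cons c t ih =>
    intro s m hm
    by_cases hc : PySem.Int.mod (pvDigitInt c) k = 0
    · simp only [List.foldl, hc, if_pos, pvH]
      rw [ih (s.push c) _ (by split <;> omega)]
      simp [String.length_push]
      omega
    · simp only [List.foldl, hc, if_neg, not_false_iff, pvH]
      rw [ih "" m hm]
      simp

theorem pvH_span (k : Int) (l : List Char) : ∀ (cur : Nat),
    pvH k cur l = max (if pvSpanDiv k l = 0 then 0 else cur + pvSpanDiv k l)
                      (pvH k 0 (l.drop (pvSpanDiv k l + 1))) := by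
  induction l with
  | nil => intro cur; simp [pvH, pvSpanDiv]
  | cons c t ih =>
    intro cur
    by_cases hc : PySem.Int.mod (pvDigitInt c) k = 0
    · simp only [pvH, pvSpanDiv, hc, if_pos]
      rw [ih (cur + 1)]
      rcases Nat.eq_zero_or_pos (pvSpanDiv k t) with h0 | hp
      · simp [h0]
      · have hne : pvSpanDiv k t ≠ 0 := by omega
        simp [hne]
        omega
    · simp [pvH, pvSpanDiv, hc]

theorem pvLongest_eq_pvH (k : Int) : ∀ (n : Nat) (l : List Char), l.length = n →
    pvLongest k l = ((pvH k 0 l : Nat) : Int) := by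
  intro n
  induction n using Nat.strong_induction_on with
  | _ n ih =>
    intro l hl
    match l with
    | [] => simp [pvLongest, pvH]
    | c :: t =>
      rw [pvLongest]
      simp only [List.cons_ne_nil, if_neg, not_false_iff]
      have hlt : ((c :: t).drop (pvSpanDiv k (c :: t) + 1)).length < n := by
        subst hl; simp [List.length_drop]
      rw [ih _ hlt _ rfl, pvH_span k (c :: t) 0]
      rcases Nat.eq_zero_or_pos (pvSpanDiv k (c :: t)) with h0 | hp
      · simp [h0]
      · have hne : pvSpanDiv k (c :: t) ≠ 0 := by omega
        simp only [hne, if_false, Nat.zero_add]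
        push_cast
        omega

-- ===== VERDICT (by name: the statement is the Claim_ definition above) =====
theorem max_div_seq_spec : Claim_equal_max_div_seq := by
  intro n k _ _
  unfold Spec_max_div_seq max_div_seq max_div_seq_alt
  rw [foldA_eq_pvH k _ "" 0 le_rfl, pvLongest_eq_pvH k _ _ rfl]
  simp
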